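-- pv_equiv track=rewrite | github.com/updaun/CodingTest | programmers/2022/221219_4.py | solution
-- ===== SOURCE A (Python) =====
-- can = ["aya", "ye", "woo", "ma"]
--
-- def check(my_string):
--     for i in can:
--         if i in my_string:
--             return i
--     return None
--
-- def solution(babbling):
--     answer = 0
--     for t in babbling:
--         while True:
--             s = check(t)
--             if s:
--                 t = t.replace(s,str(can.index(s)))
--             else:
--                 break
--         if t.isdigit():
--             answer += 1
--     return answer
-- ===== SOURCE B (Python) =====
-- def solution(babbling):
--     def tok(c):
--         if c == 'a':
--             return 'aya'
--         if c == 'y':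
--             return 'ye'
--         if c == 'w':
--             return 'woo'
--         if c == 'm':
--             return 'ma'
--         return None
--
--     def ok(t):
--         i, n = 0, len(t)
--         while i < n:
--             if t[i].isdigit():
--                 i += 1
--                 continue
--             w = tok(t[i])
--             if w is not None and t.startswith(w, i):
--                 i += len(w)
--             else:
--                 return False
--         return n > 0
--
--     return sum(1 for t in babbling if ok(t))
-- ===== Notes on version B (the rewrite author's own statement) =====
-- stated objective: alternative
-- what changed: A repeatedly searches the whole word for a token and rebuilds the string with str.replace until none is left, then tests isdigit; B makes a single left-to-right pass that at each position consumes a digit or the token uniquely determined by its first letter (the four tokens start with distinct letters), with no string rewriting.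
import Mathlib
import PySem

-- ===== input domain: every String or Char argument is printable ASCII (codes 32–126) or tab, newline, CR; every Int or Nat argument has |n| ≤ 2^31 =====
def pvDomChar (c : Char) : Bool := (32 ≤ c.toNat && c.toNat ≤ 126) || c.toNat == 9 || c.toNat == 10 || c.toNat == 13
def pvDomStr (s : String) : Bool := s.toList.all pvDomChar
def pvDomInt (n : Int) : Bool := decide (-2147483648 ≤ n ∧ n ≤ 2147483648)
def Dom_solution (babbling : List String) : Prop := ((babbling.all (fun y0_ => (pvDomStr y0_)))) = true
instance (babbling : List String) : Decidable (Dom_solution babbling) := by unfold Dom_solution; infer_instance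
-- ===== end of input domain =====

-- B replaces A's repeated find-and-replace rewriting loop by a single left-to-right parse
-- (at each position consume a digit or the unique token starting with that letter); objective: alternative.

-- ===== PORT A =====
-- A's `can` list, as lists of characters.
def canChars : List (List Char) := [['a','y','a'], ['y','e'], ['w','o','o'], ['m','a']]

def checkGo : List (List Char) → List Char → Option (List Char)
  | [], _ => none
  | i :: rest, s => if PySem.Chars.isIn i s then some i else checkGo rest s

def checkA (l : List Char) : Option (List Char) := checkGo canChars l

-- A's `while True` loop; the fuel argument (called with length+1, always sufficient:
-- every replacement strictly shortens the word, see `replace_decreases` below) only makes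
-- the same computation total.
def loopA : Nat → List Char → List Char
  | 0, l => l
  | fuel + 1, l =>
    match checkA l with
    | some s =>
      loopA fuel (PySem.Chars.replace l s (PySem.Int.toChars (((PySem.List.index? canChars s).getD 0 : Nat) : Int)))
    | none => l

def solution (babbling : List String) : Int :=
  babbling.foldl
    (fun answer t => answer + (if PySem.Chars.strIsdigit (loopA (t.toList.length + 1) t.toList) then 1 else 0)) 0

-- ===== PORT B =====
def tokB (c : Char) : Option (List Char) :=
  if c = 'a' then some ['a','y','a']
  else if c = 'y' then some ['y','e']
  else if c = 'w' then some ['w','o','o']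
  else if c = 'm' then some ['m','a']
  else none

-- cited by `okGo`'s decreasing_by (termination only)
theorem tokB_length_pos (c : Char) (w : List Char) (h : tokB c = some w) : 1 ≤ w.length := by
  unfold tokB at h
  split_ifs at h <;> (injection h with h; subst h; simp)

def okGo : List Char → Bool
  | [] => true
  | c :: rest =>
    if PySem.Chars.isdigit c then okGo rest
    else
      match h : tokB c with
      | some w => if PySem.Chars.startswith (c :: rest) w then okGo ((c :: rest).drop w.length) else false
      | none => false
termination_by l => l.length
decreasing_by
  · simp
  · have := tokB_length_pos c w h
    simp
    omega

def okB (l : List Char) : Bool := okGo l && !l.isEmpty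

def solution_alt (babbling : List String) : Int :=
  (babbling.map (fun t => if okB t.toList then (1 : Int) else 0)).sum

-- ===== PRECONDITION & SPEC =====
def Spec_solution (babbling : List String) (out : Int) : Prop := out = solution_alt babbling
instance (babbling : List String) (out : Int) : Decidable (Spec_solution babbling out) := by unfold Spec_solution; infer_instance

-- ===== CLAIM (what is proved, stated in full; the proofs are below) =====
def Claim_equal_solution : Prop := ∀ (babbling : List String), Dom_solution babbling → Spec_solution babbling (solution babbling)

-- ===== LEMMAS AND PROOFS =====
-- `rep old.head old.tail new l` is the structural form of CPython's str.replace scan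
-- (replace each leftmost non-overlapping occurrence), proved equal to PySem.Chars.replace below.
def rep (c₀ : Char) (tl new : List Char) : List Char → List Char
  | [] => []
  | c :: t =>
    if (c₀ :: tl).isPrefixOf (c :: t) then new ++ rep c₀ tl new (t.drop tl.length)
    else c :: rep c₀ tl new t
termination_by l => l.length
decreasing_by
  all_goals simp

@[simp] theorem rep_nil (c₀ : Char) (tl new : List Char) : rep c₀ tl new [] = [] := by
  rw [rep.eq_def]

theorem rep_cons (c₀ : Char) (tl new : List Char) (c : Char) (t : List Char) :
    rep c₀ tl new (c :: t) =
      if (c₀ :: tl).isPrefixOf (c :: t) then new ++ rep c₀ tl new (t.drop tl.length)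
      else c :: rep c₀ tl new t := by
  rw [rep.eq_def]

theorem go_spec (c₀ : Char) (tl new : List Char) :
    ∀ (fuel : Nat) (l acc : List Char), l.length ≤ fuel →
      PySem.Chars.replace.go (c₀ :: tl) new fuel l acc = acc.reverse ++ rep c₀ tl new l := by
  intro fuel
  induction fuel with
  | zero =>
    intro l acc h
    have : l = [] := by cases l <;> simp_all
    subst this
    simp [PySem.Chars.replace.go]
  | succ n ih =>
    intro l acc h
    cases l with
    | nil => simp [PySem.Chars.replace.go]
    | cons c t =>
      rw [PySem.Chars.replace.go]
      rw [rep_cons]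
      by_cases hp : (c₀ :: tl).isPrefixOf (c :: t)
      · simp only [hp, if_true, List.length_cons, List.drop_succ_cons]
        rw [ih (t.drop tl.length) (new.reverse ++ acc) (by simp at h ⊢; omega)]
        simp
      · simp only [hp]
        rw [ih t (c :: acc) (by simp at h ⊢; omega)]
        simp

theorem replace_eq (c₀ : Char) (tl new l : List Char) :
    PySem.Chars.replace l (c₀ :: tl) new = rep c₀ tl new l := by
  rw [PySem.Chars.replace]
  simp [go_spec c₀ tl new l.length l [] le_rfl]

theorem rep_length_le (c₀ : Char) (tl new : List Char) (hn : new.length ≤ tl.length + 1) :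
    ∀ (n : Nat) (l : List Char), l.length ≤ n → (rep c₀ tl new l).length ≤ l.length := by
  intro n
  induction n with
  | zero => intro l h; have : l = [] := by cases l <;> simp_all
            subst this; simp
  | succ n ih =>
    intro l h
    cases l with
    | nil => simp
    | cons c t =>
      rw [rep_cons]
      by_cases hp : (c₀ :: tl).isPrefixOf (c :: t)
      · rw [if_pos hp]
        have h1 := ih (t.drop tl.length) (by simp at h ⊢; omega)
        have hlen : tl.length ≤ t.length := by
          rw [List.isPrefixOf_iff_prefix] at hp
          have := hp.length_le
          simp at this; omega
        simp at h h1 ⊢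
        omega
      · rw [if_neg hp]
        have h1 := ih t (by simp at h; omega)
        simp only [List.length_cons]
        omega

theorem rep_length_lt (c₀ : Char) (tl new : List Char) (hn : new.length < tl.length + 1) :
    ∀ (n : Nat) (l : List Char), l.length ≤ n → (∃ j, (c₀ :: tl) <+: l.drop j) →
      (rep c₀ tl new l).length < l.length := by
  intro n
  induction n with
  | zero =>
    intro l h hocc
    have : l = [] := by cases l <;> simp_all
    subst this
    obtain ⟨j, hj⟩ := hocc
    simp at hj
  | succ n ih =>
    intro l h hocc
    cases l with
    | nil =>
      obtain ⟨j, hj⟩ := hocc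
      simp at hj
    | cons c t =>
      rw [rep_cons]
      by_cases hp : (c₀ :: tl).isPrefixOf (c :: t)
      · rw [if_pos hp]
        have h1 := rep_length_le c₀ tl new (by omega) n (t.drop tl.length) (by simp at h ⊢; omega)
        have hlen : tl.length ≤ t.length := by
          rw [List.isPrefixOf_iff_prefix] at hp
          have := hp.length_le
          simp at this; omega
        simp at h h1 ⊢
        omega
      · rw [if_neg hp]
        obtain ⟨j, hj⟩ := hocc
        cases j with
        | zero =>
          rw [List.drop_zero] at hj
          rw [List.isPrefixOf_iff_prefix] at hp
          exact absurd hj hp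
        | succ j' =>
          have h1 := ih t (by simp at h; omega) ⟨j', by simpa using hj⟩
          simp only [List.length_cons]
          omega

theorem checkA_mem_isIn (l s : List Char) (h : checkA l = some s) :
    s ∈ canChars ∧ PySem.Chars.isIn s l = true := by
  unfold checkA canChars at h
  rw [checkGo, checkGo, checkGo, checkGo, checkGo] at h
  split_ifs at h <;> simp_all [canChars]

theorem replace_decreases (l s : List Char) (h : checkA l = some s) :
    (PySem.Chars.replace l s (PySem.Int.toChars (((PySem.List.index? canChars s).getD 0 : Nat) : Int))).length < l.length := by
  obtain ⟨hmem, hin⟩ := checkA_mem_isIn l s h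
  have hocc : ∃ j, s <+: l.drop j := (PySem.Chars.exists_prefix_drop_iff_isIn s l).mpr hin
  fin_cases hmem
  · rw [show (PySem.Int.toChars (((PySem.List.index? canChars ['a','y','a']).getD 0 : Nat) : Int)) = ['0'] from by decide, replace_eq]
    exact rep_length_lt _ _ _ (by decide) l.length l le_rfl hocc
  · rw [show (PySem.Int.toChars (((PySem.List.index? canChars ['y','e']).getD 0 : Nat) : Int)) = ['1'] from by decide, replace_eq]
    exact rep_length_lt _ _ _ (by decide) l.length l le_rfl hocc
  · rw [show (PySem.Int.toChars (((PySem.List.index? canChars ['w','o','o']).getD 0 : Nat) : Int)) = ['2'] from by decide, replace_eq]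
    exact rep_length_lt _ _ _ (by decide) l.length l le_rfl hocc
  · rw [show (PySem.Int.toChars (((PySem.List.index? canChars ['m','a']).getD 0 : Nat) : Int)) = ['3'] from by decide, replace_eq]
    exact rep_length_lt _ _ _ (by decide) l.length l le_rfl hocc

@[simp] theorem okGo_nil : okGo [] = true := by rw [okGo.eq_def]

theorem okGo_cons_digit (c : Char) (t : List Char) (hd : PySem.Chars.isdigit c = true) :
    okGo (c :: t) = okGo t := by
  rw [okGo.eq_def]; simp [hd]

theorem okGo_cons_tok (c : Char) (t w : List Char) (hdc : PySem.Chars.isdigit c = false)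
    (hw : tokB c = some w) :
    okGo (c :: t) = if w.isPrefixOf (c :: t) then okGo ((c :: t).drop w.length) else false := by
  rw [okGo.eq_def]
  simp only [hdc, Bool.false_eq_true, if_false]
  split <;> simp_all [PySem.Chars.startswith]

theorem okGo_cons_none (c : Char) (t : List Char) (hdc : PySem.Chars.isdigit c = false)
    (hw : tokB c = none) : okGo (c :: t) = false := by
  rw [okGo.eq_def]
  simp only [hdc, Bool.false_eq_true, if_false]
  split <;> simp_all

theorem rep_copy (c₀ : Char) (tl new : List Char) :
    ∀ (k : Nat) (l : List Char), (∀ j, j < k → ¬ (c₀ :: tl) <+: l.drop j) →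
      rep c₀ tl new l = l.take k ++ rep c₀ tl new (l.drop k) := by
  intro k
  induction k with
  | zero => intro l _; simp
  | succ k ih =>
    intro l h
    cases l with
    | nil => simp
    | cons c t =>
      rw [rep_cons, if_neg (by rw [List.isPrefixOf_iff_prefix]; exact h 0 (by omega))]
      rw [ih t (fun j hj => by simpa using h (j + 1) (by omega))]
      simp

theorem tokB_mem (c : Char) (w : List Char) (h : tokB c = some w) : w ∈ canChars := by
  unfold tokB at h
  split_ifs at h <;> (injection h with h; subst h; simp [canChars])

theorem okGo_tokenfree (l : List Char) (h : ∀ s ∈ canChars, ¬ s <:+: l) :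
    okGo l = l.all PySem.Chars.isdigit := by
  induction l with
  | nil => simp
  | cons c t ih =>
    have ht : ∀ s ∈ canChars, ¬ s <:+: t := fun s hs hinf => h s hs (List.infix_cons hinf)
    by_cases hdc : PySem.Chars.isdigit c
    · rw [okGo_cons_digit c t hdc, ih ht]
      simp [hdc]
    · simp only [List.all_cons, hdc, Bool.false_and]
      cases hw : tokB c with
      | none => exact okGo_cons_none c t (by simp [hdc]) hw
      | some w =>
        rw [okGo_cons_tok c t w (by simp [hdc]) hw]
        rw [if_neg]
        rw [List.isPrefixOf_iff_prefix]
        exact fun hpre => h w (tokB_mem c w hw) hpre.isInfix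

theorem okGo_rep_mpr (c₀ : Char) (tl : List Char) (d : Char)
    (hs : (c₀ :: tl) ∈ canChars) (hd : PySem.Chars.isdigit d = true) :
    ∀ (n : Nat) (l : List Char), l.length ≤ n →
      okGo (rep c₀ tl [d] l) = true → okGo l = true := by
  intro n
  induction n with
  | zero =>
    intro l h _
    have : l = [] := by cases l <;> simp_all
    simp [this]
  | succ n ih =>
    intro l h hok
    cases l with
    | nil => simp
    | cons c t =>
      by_cases hp : (c₀ :: tl) <+: (c :: t)
      · rw [rep_cons, if_pos (List.isPrefixOf_iff_prefix.mpr hp), List.singleton_append,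
          okGo_cons_digit _ _ hd] at hok
        have h2 : okGo (t.drop tl.length) = true :=
          ih (t.drop tl.length) (by simp at h ⊢; omega) hok
        rw [List.cons_prefix_cons] at hp
        obtain ⟨hc, htl⟩ := hp
        subst hc
        fin_cases hs
        · rw [okGo_cons_tok 'a' t ['a','y','a'] (by decide) (by decide : tokB 'a' = some ['a','y','a']),
            if_pos (by rw [List.isPrefixOf_iff_prefix, List.cons_prefix_cons]; exact ⟨rfl, htl⟩)]
          simpa using h2
        · rw [okGo_cons_tok 'y' t ['y','e'] (by decide) (by decide : tokB 'y' = some ['y','e']),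
            if_pos (by rw [List.isPrefixOf_iff_prefix, List.cons_prefix_cons]; exact ⟨rfl, htl⟩)]
          simpa using h2
        · rw [okGo_cons_tok 'w' t ['w','o','o'] (by decide) (by decide : tokB 'w' = some ['w','o','o']),
            if_pos (by rw [List.isPrefixOf_iff_prefix, List.cons_prefix_cons]; exact ⟨rfl, htl⟩)]
          simpa using h2
        · rw [okGo_cons_tok 'm' t ['m','a'] (by decide) (by decide : tokB 'm' = some ['m','a']),
            if_pos (by rw [List.isPrefixOf_iff_prefix, List.cons_prefix_cons]; exact ⟨rfl, htl⟩)]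
          simpa using h2
      · rw [rep_cons, if_neg (by rw [List.isPrefixOf_iff_prefix]; exact hp)] at hok
        by_cases hdc : PySem.Chars.isdigit c
        · rw [okGo_cons_digit _ _ hdc] at hok ⊢
          exact ih t (by simp at h; omega) hok
        · replace hdc : PySem.Chars.isdigit c = false := by simp [hdc]
          cases hw : tokB c with
          | none => rw [okGo_cons_none _ _ hdc hw] at hok; exact absurd hok (by simp)
          | some w =>
            rw [okGo_cons_tok _ _ w hdc hw] at hok
            by_cases hpre : w.isPrefixOf (c :: rep c₀ tl [d] t)
            · rw [if_pos hpre] at hok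
              rw [List.isPrefixOf_iff_prefix] at hpre
              by_cases hcl : ∀ j, j < w.length - 1 → ¬ (c₀ :: tl) <+: t.drop j
              · -- clean case
                have hrep := rep_copy c₀ tl [d] (w.length - 1) t hcl
                by_cases hlen : w.length - 1 ≤ t.length
                · have hw1 := tokB_length_pos c w hw
                  have hsplit : c :: rep c₀ tl [d] t
                      = (c :: t.take (w.length - 1)) ++ rep c₀ tl [d] (t.drop (w.length - 1)) := by
                    rw [hrep]; simp
                  have hlen2 : (c :: t.take (w.length - 1)).length = w.length := by
                    simp; omega
                  have hweq : w = c :: t.take (w.length - 1) := by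
                    rw [List.prefix_iff_eq_take] at hpre
                    conv_lhs => rw [hpre]
                    rw [hsplit, List.take_left' hlen2]
                  have hTl : w <+: c :: t := by
                    rw [hweq, List.cons_prefix_cons]
                    exact ⟨rfl, List.take_prefix _ _⟩
                  rw [okGo_cons_tok _ _ w hdc hw, if_pos (List.isPrefixOf_iff_prefix.mpr hTl)]
                  have hdrop : (c :: rep c₀ tl [d] t).drop w.length
                      = rep c₀ tl [d] (t.drop (w.length - 1)) := by
                    rw [hsplit]
                    exact List.drop_left' hlen2
                  rw [hdrop] at hok
                  have := ih (t.drop (w.length - 1)) (by simp at h ⊢; omega) hok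
                  have hdrop2 : (c :: t).drop w.length = t.drop (w.length - 1) := by
                    cases w with
                    | nil => simp at hw1
                    | cons wh wt => simp
                  rw [hdrop2]
                  exact this
                · -- t shorter than the token tail: rep t = t
                  have hrt : rep c₀ tl [d] t = t := by
                    rw [hrep, List.take_of_length_le (by omega), List.drop_of_length_le (by omega)]
                    simp
                  rw [hrt] at hpre hok
                  rw [okGo_cons_tok _ _ w hdc hw, if_pos (List.isPrefixOf_iff_prefix.mpr hpre)]
                  exact hok
              · -- dirty case: an occurrence of the token starts inside w's span; contradiction
                push_neg at hcl
                obtain ⟨j, hj, hocc⟩ := hcl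
                exfalso
                have hwle : w.length ≤ 3 := by
                  unfold tokB at hw
                  split_ifs at hw <;> (injection hw with hw; subst hw; simp)
                by_cases h0 : (c₀ :: tl) <+: t
                · cases t with
                  | nil => simp at h0
                  | cons t1 t' =>
                    rw [rep_cons, if_pos (List.isPrefixOf_iff_prefix.mpr h0),
                      List.singleton_append] at hpre
                    unfold tokB at hw
                    split_ifs at hw <;>
                      (injection hw with hw; subst hw;
                       rw [List.cons_prefix_cons] at hpre;
                       obtain ⟨-, hpre⟩ := hpre;
                       rw [List.cons_prefix_cons] at hpre;
                       obtain ⟨hde, -⟩ := hpre;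
                       rw [← hde] at hd; exact absurd hd (by decide))
                · have hj1 : j = 1 := by
                    cases j with
                    | zero => simp only [List.drop_zero] at hocc; exact absurd hocc h0
                    | succ j' => omega
                  subst hj1
                  cases t with
                  | nil => simp at hocc
                  | cons t1 t' =>
                    simp only [List.drop_succ_cons, List.drop_zero] at hocc
                    rw [rep_cons, if_neg (by rw [List.isPrefixOf_iff_prefix]; exact h0)] at hpre
                    cases t' with
                    | nil => simp at hocc
                    | cons t2 t'' =>
                      rw [rep_cons, if_pos (List.isPrefixOf_iff_prefix.mpr hocc),
                        List.singleton_append] at hpre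
                      unfold tokB at hw
                      split_ifs at hw <;>
                        (injection hw with hw; subst hw;
                         first
                         | (rw [List.cons_prefix_cons] at hpre
                            obtain ⟨-, hpre⟩ := hpre
                            rw [List.cons_prefix_cons] at hpre
                            obtain ⟨-, hpre⟩ := hpre
                            rw [List.cons_prefix_cons] at hpre
                            obtain ⟨hde, -⟩ := hpre
                            rw [← hde] at hd; exact absurd hd (by decide))
                         | exact absurd hj (by simp))
            · rw [if_neg hpre] at hok
              exact absurd hok (by simp)

theorem okGo_rep_mp (c₀ : Char) (tl : List Char) (d : Char)
    (hs : (c₀ :: tl) ∈ canChars) (hd : PySem.Chars.isdigit d = true) :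
    ∀ (n : Nat) (l : List Char), l.length ≤ n →
      okGo l = true → okGo (rep c₀ tl [d] l) = true := by
  intro n
  induction n with
  | zero =>
    intro l h _
    have : l = [] := by cases l <;> simp_all
    simp [this]
  | succ n ih =>
    intro l h hok
    cases l with
    | nil => simp
    | cons c t =>
      by_cases hp : (c₀ :: tl) <+: (c :: t)
      · rw [rep_cons, if_pos (List.isPrefixOf_iff_prefix.mpr hp), List.singleton_append,
          okGo_cons_digit _ _ hd]
        have hp' := hp
        rw [List.cons_prefix_cons] at hp'
        obtain ⟨hc, htl⟩ := hp'
        subst hc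
        fin_cases hs
        · rw [okGo_cons_tok 'a' t ['a','y','a'] (by decide) (by decide : tokB 'a' = some ['a','y','a']),
            if_pos (by rw [List.isPrefixOf_iff_prefix, List.cons_prefix_cons]; exact ⟨rfl, htl⟩)] at hok
          exact ih _ (by simp at h ⊢; omega) (by simpa using hok)
        · rw [okGo_cons_tok 'y' t ['y','e'] (by decide) (by decide : tokB 'y' = some ['y','e']),
            if_pos (by rw [List.isPrefixOf_iff_prefix, List.cons_prefix_cons]; exact ⟨rfl, htl⟩)] at hok
          exact ih _ (by simp at h ⊢; omega) (by simpa using hok)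
        · rw [okGo_cons_tok 'w' t ['w','o','o'] (by decide) (by decide : tokB 'w' = some ['w','o','o']),
            if_pos (by rw [List.isPrefixOf_iff_prefix, List.cons_prefix_cons]; exact ⟨rfl, htl⟩)] at hok
          exact ih _ (by simp at h ⊢; omega) (by simpa using hok)
        · rw [okGo_cons_tok 'm' t ['m','a'] (by decide) (by decide : tokB 'm' = some ['m','a']),
            if_pos (by rw [List.isPrefixOf_iff_prefix, List.cons_prefix_cons]; exact ⟨rfl, htl⟩)] at hok
          exact ih _ (by simp at h ⊢; omega) (by simpa using hok)
      · rw [rep_cons, if_neg (by rw [List.isPrefixOf_iff_prefix]; exact hp)]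
        by_cases hdc : PySem.Chars.isdigit c
        · rw [okGo_cons_digit _ _ hdc] at hok
          rw [okGo_cons_digit _ _ hdc]
          exact ih t (by simp at h; omega) hok
        · replace hdc : PySem.Chars.isdigit c = false := by simp [hdc]
          cases hw : tokB c with
          | none =>
            rw [okGo_cons_none _ _ hdc hw] at hok
            exact absurd hok (by simp)
          | some w =>
            rw [okGo_cons_tok _ _ w hdc hw] at hok
            by_cases hpre : w.isPrefixOf (c :: t)
            · rw [if_pos hpre] at hok
              rw [List.isPrefixOf_iff_prefix] at hpre
              have hw1 := tokB_length_pos c w hw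
              by_cases hcl : ∀ j, j < w.length - 1 → ¬ (c₀ :: tl) <+: t.drop j
              · -- clean case
                cases w with
                | nil => simp at hw1
                | cons wh wtl =>
                  rw [List.cons_prefix_cons] at hpre
                  obtain ⟨rfl, hpre⟩ := hpre
                  simp only [List.length_cons, Nat.add_sub_cancel] at hcl hok
                  have hrep := rep_copy c₀ tl [d] wtl.length t hcl
                  have hwt : wtl = t.take wtl.length := List.prefix_iff_eq_take.mp hpre
                  rw [hrep, ← hwt]
                  rw [okGo_cons_tok wh (wtl ++ rep c₀ tl [d] (t.drop wtl.length)) (wh :: wtl) hdc hw]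
                  rw [if_pos (by
                    rw [List.isPrefixOf_iff_prefix, ← List.cons_append]
                    exact List.prefix_append _ _)]
                  simp only [List.length_cons, List.drop_succ_cons, List.drop_left]
                  rw [List.drop_succ_cons] at hok
                  exact ih _ (by simp at h ⊢; omega) hok
              · -- dirty case: contradiction
                exfalso
                push_neg at hcl
                obtain ⟨j, hj, hocc⟩ := hcl
                have hpre' := hpre
                unfold tokB at hw
                split_ifs at hw with e1 e2 e3 e4 <;>
                  (injection hw with hw; subst hw;
                   rw [List.cons_prefix_cons] at hpre';
                   obtain ⟨-, hpre'⟩ := hpre';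
                   obtain ⟨r1, hr1⟩ := hpre';
                   subst hr1;
                   simp only [List.cons_append, List.nil_append] at hok hpre hp hocc h;
                   have hjo : j = 0 ∨ j = 1 := by simp at hj; omega) <;>
                  (try subst e1) <;> (try subst e2) <;> (try subst e3) <;> (try subst e4) <;>
                  rcases hjo with rfl | rfl <;> fin_cases hs <;>
                  first
                  | exact absurd hpre hp
                  | (-- w = "ma", s = "aya", occurrence at t.drop 0
                     simp only [List.drop_zero] at hocc
                     rw [List.cons_prefix_cons] at hocc
                     obtain ⟨-, hocc⟩ := hocc
                     obtain ⟨r2, hr2⟩ := hocc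
                     subst hr2
                     simp only [List.cons_append, List.nil_append] at hok
                     rw [show (['m','a'] : List Char).length = 0 + 1 + 1 from rfl,
                       List.drop_succ_cons, List.drop_succ_cons, List.drop_zero] at hok
                     rw [okGo_cons_tok 'y' _ ['y','e'] (by decide)
                       (by decide : tokB 'y' = some ['y','e'])] at hok
                     rw [if_neg (by
                       rw [List.isPrefixOf_iff_prefix, List.cons_prefix_cons]
                       rintro ⟨-, hbad⟩
                       rw [List.cons_prefix_cons] at hbad
                       simp at hbad)] at hok
                     exact absurd hok (by simp))
                  | (simp [List.cons_prefix_cons] at hocc; done)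
                  | exact absurd hj (by decide)

            · rw [if_neg hpre] at hok
              exact absurd hok (by simp)

theorem okGo_rep_eq (c₀ : Char) (tl : List Char) (d : Char)
    (hs : (c₀ :: tl) ∈ canChars) (hd : PySem.Chars.isdigit d = true) (l : List Char) :
    okGo (rep c₀ tl [d] l) = okGo l := by
  cases hgo : okGo l with
  | true => exact okGo_rep_mp c₀ tl d hs hd l.length l le_rfl hgo
  | false =>
    cases hgo2 : okGo (rep c₀ tl [d] l) with
    | false => rfl
    | true => exact absurd (okGo_rep_mpr c₀ tl d hs hd l.length l le_rfl hgo2) (by simp [hgo])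

theorem rep_isEmpty (c₀ : Char) (tl : List Char) (d : Char) (l : List Char) :
    (rep c₀ tl [d] l).isEmpty = l.isEmpty := by
  cases l with
  | nil => simp
  | cons c t =>
    rw [rep_cons]
    by_cases hp : (c₀ :: tl).isPrefixOf (c :: t)
    · rw [if_pos hp]; simp
    · rw [if_neg hp]; simp

theorem checkA_none (l : List Char) (h : checkA l = none) :
    ∀ s ∈ canChars, ¬ s <:+: l := by
  unfold checkA canChars at h
  rw [checkGo, checkGo, checkGo, checkGo] at h
  split_ifs at h with h1 h2 h3 h4
  intro s hs
  fin_cases hs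
  · exact (PySem.Chars.isIn_eq_false_iff _ _).mp (by simpa using h1)
  · exact (PySem.Chars.isIn_eq_false_iff _ _).mp (by simpa using h2)
  · exact (PySem.Chars.isIn_eq_false_iff _ _).mp (by simpa using h3)
  · exact (PySem.Chars.isIn_eq_false_iff _ _).mp (by simpa using h4)

theorem strIsdigit_loopA : ∀ (fuel : Nat) (l : List Char), l.length < fuel →
    PySem.Chars.strIsdigit (loopA fuel l) = (okGo l && !l.isEmpty) := by
  intro fuel
  induction fuel with
  | zero => intro l h; omega
  | succ n ih =>
    intro l h
    cases hc : checkA l with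
    | none =>
      rw [loopA, hc]
      rw [okGo_tokenfree l (checkA_none l hc)]
      simp [PySem.Chars.strIsdigit, Bool.and_comm]
    | some s =>
      rw [loopA, hc]
      have hlt := replace_decreases l s hc
      obtain ⟨hmem, -⟩ := checkA_mem_isIn l s hc
      rw [ih _ (by omega)]
      fin_cases hmem
      · rw [show (PySem.Int.toChars (((PySem.List.index? canChars ['a','y','a']).getD 0 : Nat) : Int)) = ['0'] from by decide,
          replace_eq, okGo_rep_eq 'a' ['y','a'] '0' (by decide) (by decide), rep_isEmpty]
      · rw [show (PySem.Int.toChars (((PySem.List.index? canChars ['y','e']).getD 0 : Nat) : Int)) = ['1'] from by decide,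
          replace_eq, okGo_rep_eq 'y' ['e'] '1' (by decide) (by decide), rep_isEmpty]
      · rw [show (PySem.Int.toChars (((PySem.List.index? canChars ['w','o','o']).getD 0 : Nat) : Int)) = ['2'] from by decide,
          replace_eq, okGo_rep_eq 'w' ['o','o'] '2' (by decide) (by decide), rep_isEmpty]
      · rw [show (PySem.Int.toChars (((PySem.List.index? canChars ['m','a']).getD 0 : Nat) : Int)) = ['3'] from by decide,
          replace_eq, okGo_rep_eq 'm' ['a'] '3' (by decide) (by decide), rep_isEmpty]

theorem foldl_sum_eq : ∀ (bs : List String) (a : Int),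
    bs.foldl (fun answer t => answer + (if PySem.Chars.strIsdigit (loopA (t.toList.length + 1) t.toList) then 1 else 0)) a
      = a + (bs.map (fun t => if okB t.toList then (1 : Int) else 0)).sum := by
  intro bs
  induction bs with
  | nil => intro a; simp
  | cons b bs ih =>
    intro a
    rw [List.foldl_cons, ih, List.map_cons, List.sum_cons,
      strIsdigit_loopA (b.toList.length + 1) b.toList (by omega)]
    show a + _ + _ = _
    rw [okB]
    ring

theorem final_eq (babbling : List String) : solution babbling = solution_alt babbling := by
  unfold solution solution_alt
  rw [foldl_sum_eq]
  simp

-- ===== VERDICT (by name: the statement is the Claim_ definition above) =====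
theorem solution_spec : Claim_equal_solution := by
  intro babbling _
  unfold Spec_solution
  exact final_eq babbling
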